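-- pv_equiv track=rewrite | github.com/Fenoxe/bubbleSortAlgorithm | bubbleSortAlgo_vanilla_optim.py | getCachesForVectorized
-- ===== SOURCE A (Python) =====
-- def getCachesForVectorized(state, numBins):
--     binHeight,topBall = [None] * numBins,[None] * numBins
--
--     for i in range(numBins):
--
--         raw_i = 4 * i
--
--         if state[raw_i + 3] != ' ':
--             topBall[i] = state[raw_i + 3]
--             binHeight[i] = 4
--
--         elif state[raw_i + 2] != ' ':
--             topBall[i] = state[raw_i + 2]
--             binHeight[i] = 3
--
--         elif state[raw_i + 1] != ' ':
--             topBall[i] = state[raw_i + 1]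
--             binHeight[i] = 2
--
--         elif state[raw_i    ] != ' ':
--             topBall[i] = state[raw_i    ]
--             binHeight[i] = 1
--
--         else:
--             topBall[i] = ' '
--             binHeight[i] = 0
--
--     return binHeight,topBall
-- ===== SOURCE B (Python) =====
-- def getCachesForVectorized(state, numBins):
--     binHeight, topBall = [], []
--     for i in range(numBins):
--         # the bin's column read top-down, with the leading blanks stripped
--         rev = [state[4 * i + 3], state[4 * i + 2], state[4 * i + 1], state[4 * i]]
--         while rev and rev[0] == ' ':
--             rev = rev[1:]
--         binHeight.append(len(rev))
--         topBall.append(rev[0] if rev else ' ')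
--     return binHeight, topBall
-- ===== Notes on version B (the rewrite author's own statement) =====
-- stated objective: simpler
-- what changed: B builds each bin's column read top-down, strips the leading blanks, and takes binHeight = remaining length and topBall = first remaining cell, replacing A's preallocated None-lists and four-way descending if-elif cascade over individual cells.
import Mathlib
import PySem

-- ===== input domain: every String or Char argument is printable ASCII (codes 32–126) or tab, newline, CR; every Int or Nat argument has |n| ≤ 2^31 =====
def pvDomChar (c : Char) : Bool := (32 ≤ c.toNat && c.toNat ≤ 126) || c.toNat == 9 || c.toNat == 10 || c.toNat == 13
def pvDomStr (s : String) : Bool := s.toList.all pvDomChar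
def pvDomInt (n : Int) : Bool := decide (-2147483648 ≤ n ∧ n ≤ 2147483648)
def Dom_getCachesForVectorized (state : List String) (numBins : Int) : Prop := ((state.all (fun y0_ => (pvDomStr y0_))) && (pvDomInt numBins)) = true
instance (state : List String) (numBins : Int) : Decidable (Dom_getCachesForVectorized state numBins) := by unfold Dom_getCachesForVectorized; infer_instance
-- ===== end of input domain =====

-- B reads each bin's column top-down, strips the leading blanks, and takes height = remaining
-- length, top = first remaining cell — instead of A's preallocated None-lists and per-cell
-- if-elif cascade; same cost, simpler decomposition.

-- ===== PORT A =====
-- loop body of A's for-loop (the descending if-elif cascade writing slot i)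
def pvStepA (state : List String) (acc : List Int × List String) (i : Int) :
    List Int × List String :=
  let rawi := 4 * i
  if PySem.List.pyGetD state (rawi + 3) " " ≠ " " then
    (PySem.List.pySetD acc.1 i 4, PySem.List.pySetD acc.2 i (PySem.List.pyGetD state (rawi + 3) " "))
  else if PySem.List.pyGetD state (rawi + 2) " " ≠ " " then
    (PySem.List.pySetD acc.1 i 3, PySem.List.pySetD acc.2 i (PySem.List.pyGetD state (rawi + 2) " "))
  else if PySem.List.pyGetD state (rawi + 1) " " ≠ " " then
    (PySem.List.pySetD acc.1 i 2, PySem.List.pySetD acc.2 i (PySem.List.pyGetD state (rawi + 1) " "))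
  else if PySem.List.pyGetD state rawi " " ≠ " " then
    (PySem.List.pySetD acc.1 i 1, PySem.List.pySetD acc.2 i (PySem.List.pyGetD state rawi " "))
  else
    (PySem.List.pySetD acc.1 i 0, PySem.List.pySetD acc.2 i " ")

-- [None]*numBins modelled with placeholder 0 / " "; every slot is overwritten inside Pre_.
def getCachesForVectorized (state : List String) (numBins : Int) : List Int × List String :=
  (PySem.List.pyRange 0 numBins 1).foldl (pvStepA state)
    (List.replicate numBins.toNat 0, List.replicate numBins.toNat " ")

-- ===== PORT B =====
-- Source B's while-loop stripping the leading blanks off the top-down column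
def pvDropSpaces : List String → List String
  | [] => []
  | c :: rest => if c = " " then pvDropSpaces rest else c :: rest

-- the bin's column read top-down, with the leading blanks stripped
-- (state[4*i+k] ported as pyGetD, total under Pre_; none-default " " as in port A)
def pvRevStripped (state : List String) (i : Int) : List String :=
  pvDropSpaces [PySem.List.pyGetD state (4 * i + 3) " ", PySem.List.pyGetD state (4 * i + 2) " ",
                PySem.List.pyGetD state (4 * i + 1) " ", PySem.List.pyGetD state (4 * i) " "]

def getCachesForVectorized_alt (state : List String) (numBins : Int) : List Int × List String :=
  (PySem.List.pyRange 0 numBins 1).foldl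
    (fun acc i =>
      (acc.1 ++ [((pvRevStripped state i).length : Int)],
       acc.2 ++ [(pvRevStripped state i).headD " "]))
    ([], [])

-- ===== PRECONDITION & SPEC =====
-- Pre_ excludes exactly the inputs where A raises IndexError (a bin index past the end of state).
def Pre_getCachesForVectorized (state : List String) (numBins : Int) : Prop :=
  numBins ≤ 0 ∨ 4 * numBins ≤ (state.length : Int)
instance (state : List String) (numBins : Int) : Decidable (Pre_getCachesForVectorized state numBins) := by unfold Pre_getCachesForVectorized; infer_instance

def pvWitness_getCachesForVectorized : List String × Int := (["a", " ", " ", " "], 1)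

def Spec_getCachesForVectorized (state : List String) (numBins : Int) (out : List Int × List String) : Prop := out = getCachesForVectorized_alt state numBins
instance (state : List String) (numBins : Int) (out : List Int × List String) : Decidable (Spec_getCachesForVectorized state numBins out) := by unfold Spec_getCachesForVectorized; infer_instance

-- ===== CLAIM (what is proved, stated in full; the proofs are below) =====
def Claim_equal_getCachesForVectorized : Prop := ∀ (state : List String) (numBins : Int), Dom_getCachesForVectorized state numBins → Pre_getCachesForVectorized state numBins → Spec_getCachesForVectorized state numBins (getCachesForVectorized state numBins)

-- ===== LEMMAS AND PROOFS =====

-- A's per-bin height and top ball, read off the cascade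
def pvHA (state : List String) (i : Int) : Int :=
  if PySem.List.pyGetD state (4 * i + 3) " " ≠ " " then 4
  else if PySem.List.pyGetD state (4 * i + 2) " " ≠ " " then 3
  else if PySem.List.pyGetD state (4 * i + 1) " " ≠ " " then 2
  else if PySem.List.pyGetD state (4 * i) " " ≠ " " then 1
  else 0

def pvTA (state : List String) (i : Int) : String :=
  if PySem.List.pyGetD state (4 * i + 3) " " ≠ " " then PySem.List.pyGetD state (4 * i + 3) " "
  else if PySem.List.pyGetD state (4 * i + 2) " " ≠ " " then PySem.List.pyGetD state (4 * i + 2) " "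
  else if PySem.List.pyGetD state (4 * i + 1) " " ≠ " " then PySem.List.pyGetD state (4 * i + 1) " "
  else if PySem.List.pyGetD state (4 * i) " " ≠ " " then PySem.List.pyGetD state (4 * i) " "
  else " "

theorem pvStepA_eq (state : List String) (acc : List Int × List String) (i : Int) :
    pvStepA state acc i =
      (PySem.List.pySetD acc.1 i (pvHA state i), PySem.List.pySetD acc.2 i (pvTA state i)) := by
  simp only [pvStepA, pvHA, pvTA]
  split_ifs <;> rfl

theorem pv_take_set {α : Type} (l : List α) (j : Nat) (v : α) (h : j < l.length) :
    (l.set j v).take (j + 1) = l.take j ++ [v] := by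
  induction l generalizing j with
  | nil => simp at h
  | cons x t ih =>
    cases j with
    | zero => simp
    | succ j => simp [ih j (by simpa using h)]

theorem pvA_fold (state : List String) (numBins : Int) :
    ∀ (k : Nat) (m : Int), 0 ≤ m → (numBins - m).toNat = k →
    ∀ (b1 : List Int) (b2 : List String),
      b1.length = numBins.toNat → b2.length = numBins.toNat →
      (PySem.List.pyRange m numBins 1).foldl (pvStepA state) (b1, b2) =
        (b1.take m.toNat ++ (PySem.List.pyRange m numBins 1).map (pvHA state),
         b2.take m.toNat ++ (PySem.List.pyRange m numBins 1).map (pvTA state)) := by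
  intro k
  induction k with
  | zero =>
    intro m hm hk b1 b2 h1 h2
    rw [PySem.List.pyRange_one_eq_nil (by omega)]
    simp only [List.foldl_nil, List.map_nil, List.append_nil]
    rw [List.take_of_length_le (by omega), List.take_of_length_le (by omega)]
  | succ k ih =>
    intro m hm hk b1 b2 h1 h2
    have hlt : m < numBins := by omega
    rw [PySem.List.pyRange_one_cons hlt, List.foldl_cons, List.map_cons, List.map_cons,
        pvStepA_eq, PySem.List.pySetD_of_nonneg _ _ hm, PySem.List.pySetD_of_nonneg _ _ hm,
        ih (m + 1) (by omega) (by omega) _ _ (by simpa using h1) (by simpa using h2)]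
    have hmt : (m + 1).toNat = m.toNat + 1 := by omega
    rw [hmt, pv_take_set _ _ _ (by simp [h1]; omega), pv_take_set _ _ _ (by simp [h2]; omega)]
    simp

theorem pvB_fold (state : List String) :
    ∀ (l : List Int) (xs : List Int) (ys : List String),
      l.foldl (fun acc i =>
          (acc.1 ++ [((pvRevStripped state i).length : Int)],
           acc.2 ++ [(pvRevStripped state i).headD " "])) (xs, ys) =
        (xs ++ l.map (fun i => ((pvRevStripped state i).length : Int)),
         ys ++ l.map (fun i => (pvRevStripped state i).headD " ")) := by
  intro l
  induction l with
  | nil => simp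
  | cons a t ih => intro xs ys; rw [List.foldl_cons, ih]; simp

theorem pv_pointwise (state : List String) (i : Int) :
    pvHA state i = ((pvRevStripped state i).length : Int) ∧
    pvTA state i = (pvRevStripped state i).headD " " := by
  unfold pvRevStripped pvHA pvTA
  by_cases hd : PySem.List.pyGetD state (4 * i + 3) " " = " " <;>
    by_cases hc : PySem.List.pyGetD state (4 * i + 2) " " = " " <;>
      by_cases hb : PySem.List.pyGetD state (4 * i + 1) " " = " " <;>
        by_cases ha : PySem.List.pyGetD state (4 * i) " " = " " <;>
          simp [pvDropSpaces, hd, hc, hb, ha]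

theorem getCachesForVectorized_spec : Claim_equal_getCachesForVectorized := by
  intro state numBins _ hpre
  unfold Spec_getCachesForVectorized getCachesForVectorized getCachesForVectorized_alt
  rw [pvA_fold state numBins (numBins - 0).toNat 0 le_rfl rfl _ _ (by simp) (by simp),
      pvB_fold state]
  simp only [Int.toNat_zero, List.take_zero, List.nil_append]
  rcases hpre with h | h
  · rw [PySem.List.pyRange_one_eq_nil h]; simp
  · refine congrArg₂ Prod.mk ?_ ?_ <;>
      refine List.map_congr_left (fun i _ => ?_)
    · exact (pv_pointwise state i).1
    · exact (pv_pointwise state i).2
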